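-- pv_equiv track=rewrite | github.com/michaelayoade/dotmac_framework | consolidate_deps.py | generate_consolidated_requirements
-- ===== SOURCE A (Python) =====
-- from collections import defaultdict, Counter
-- from typing import Dict, Set, List, Tuple
--
-- def generate_consolidated_requirements(analysis: Dict) -> str:
--     """Generate a consolidated requirements.txt."""
--     # Count package usage and pick most common versions
--     package_versions = Counter()
--
--     for package, occurrences in analysis['duplicates'].items():
--         for file_path, version in occurrences:
--             package_versions[f"{package}=={version}"] += 1
--
--     # Build consolidated file
--     consolidated = []
--     consolidated.append("# CONSOLIDATED REQUIREMENTS")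
--     consolidated.append("# Auto-generated from dependency analysis")
--     consolidated.append("")
--
--     # Group by category
--     web_frameworks = []
--     databases = []
--     testing = []
--     utilities = []
--     other = []
--
--     for package, occurrences in analysis['duplicates'].items():
--         # Pick most common version
--         versions = [version for _, version in occurrences]
--         most_common_version = Counter(versions).most_common(1)[0][0]
--
--         entry = f"{package}=={most_common_version}"
--
--         # Categorize
--         if package.lower() in ['fastapi', 'uvicorn', 'starlette', 'flask', 'django']:
--             web_frameworks.append(entry)
--         elif package.lower() in ['sqlalchemy', 'asyncpg', 'psycopg2', 'redis', 'aioredis']: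
--             databases.append(entry)
--         elif package.lower() in ['pytest', 'pytest-asyncio', 'pytest-cov', 'coverage']:
--             testing.append(entry)
--         elif package.lower() in ['pydantic', 'click', 'typer', 'python-dotenv']:
--             utilities.append(entry)
--         else:
--             other.append(entry)
--
--     # Add categorized sections
--     if web_frameworks:
--         consolidated.append("# Web Frameworks")
--         consolidated.extend(sorted(web_frameworks))
--         consolidated.append("")
--
--     if databases:
--         consolidated.append("# Databases & Caching")
--         consolidated.extend(sorted(databases))
--         consolidated.append("")
--
--     if utilities:
--         consolidated.append("# Core Utilities")
--         consolidated.extend(sorted(utilities))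
--         consolidated.append("")
--
--     if testing:
--         consolidated.append("# Testing")
--         consolidated.extend(sorted(testing))
--         consolidated.append("")
--
--     if other:
--         consolidated.append("# Other Dependencies")
--         consolidated.extend(sorted(other))
--
--     return '\n'.join(consolidated)
-- ===== SOURCE B (Python) =====
-- from collections import Counter
--
-- # Data-driven section table in output order: (header, member set or None = catch-all, trailing blank line)
-- _SECTIONS = [
--     ("# Web Frameworks", frozenset(['fastapi', 'uvicorn', 'starlette', 'flask', 'django']), True),
--     ("# Databases & Caching", frozenset(['sqlalchemy', 'asyncpg', 'psycopg2', 'redis', 'aioredis']), True),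
--     ("# Core Utilities", frozenset(['pydantic', 'click', 'typer', 'python-dotenv']), True),
--     ("# Testing", frozenset(['pytest', 'pytest-asyncio', 'pytest-cov', 'coverage']), True),
--     ("# Other Dependencies", None, False),
-- ]
-- _KNOWN = frozenset().union(*(m for _, m, _ in _SECTIONS if m is not None))
--
--
-- def generate_consolidated_requirements(analysis):
--     """Generate a consolidated requirements.txt (per-section filter passes over a section table)."""
--     items = analysis['duplicates'].items()
--     parts = ["# CONSOLIDATED REQUIREMENTS", "# Auto-generated from dependency analysis", ""]
--     for header, members, trailing_blank in _SECTIONS: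
--         entries = sorted(
--             "%s==%s" % (pkg, Counter(v for _, v in occ).most_common(1)[0][0])
--             for pkg, occ in items
--             if (pkg.lower() in members if members is not None else pkg.lower() not in _KNOWN))
--         if entries:
--             parts.append(header)
--             parts.extend(entries)
--             if trailing_blank:
--                 parts.append("")
--     return '\n'.join(parts)
-- ===== Notes on version B (the rewrite author's own statement) =====
-- stated objective: alternative
-- what changed: Transposes the loop structure: instead of A's single dispatch pass appending each item into five named bucket lists via an elif chain and then five hard-coded emission blocks, B keeps no buckets at all and drives the output from an ordered section table, producing each section's entries by a filter-and-sort comprehension over the items (the catch-all section filters on non-membership in the union set); A's unused package_versions Counter pass is dropped.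
-- outside the precondition, e.g. on generate_consolidated_requirements({}): A raises KeyError, B raises KeyError
import Mathlib
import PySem

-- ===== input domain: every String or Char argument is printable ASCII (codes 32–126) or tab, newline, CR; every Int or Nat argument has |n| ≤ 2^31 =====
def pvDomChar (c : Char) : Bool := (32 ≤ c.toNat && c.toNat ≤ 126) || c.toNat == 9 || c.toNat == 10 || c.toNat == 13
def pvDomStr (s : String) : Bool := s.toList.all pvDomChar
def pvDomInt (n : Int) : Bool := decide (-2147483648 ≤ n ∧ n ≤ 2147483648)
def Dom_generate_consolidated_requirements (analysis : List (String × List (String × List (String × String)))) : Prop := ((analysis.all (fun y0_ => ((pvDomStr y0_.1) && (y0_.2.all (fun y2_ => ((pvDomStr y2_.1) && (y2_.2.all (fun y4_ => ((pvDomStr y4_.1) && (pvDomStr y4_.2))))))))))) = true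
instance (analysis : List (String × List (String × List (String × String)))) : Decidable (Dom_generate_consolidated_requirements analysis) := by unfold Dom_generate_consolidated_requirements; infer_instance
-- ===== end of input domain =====

-- B replaces A's dispatch-into-five-buckets pass and five hard-coded emission blocks by a
-- data-driven section table with one filter pass per section (objective: alternative/simpler);
-- return values agree on Pre_.

-- ===== PORT A =====
-- Counter(versions).most_common(1)[0][0]: nlargest(1) = stable descending sort, first item.
-- The [0] on an empty 'versions' raises IndexError in Python — excluded by Pre_; headD is a dummy there.
def pvMostCommon (versions : List String) : String :=
  ((PySem.List.sorted (PySem.Dict.counter versions).items (fun kv => kv.2) true).headD ("", 0)).1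

def generate_consolidated_requirements (analysis : List (String × List (String × List (String × String)))) : String :=
  -- analysis['duplicates'] (KeyError when the key is absent → excluded by Pre_, getD returns [] there);
  -- both dict levels go through PySem.Dict.ofList = Python dict construction from the pairs.
  let dups := (PySem.Dict.ofList analysis).getD "duplicates" []
  let items := (PySem.Dict.ofList dups).items
  -- package_versions Counter: computed and never used, kept for fidelity
  let _package_versions : PySem.Dict String Int :=
    items.foldl (fun d pr => pr.2.foldl (fun d fv => d.modify (pr.1 ++ "==" ++ fv.2) 0 (· + 1)) d) PySem.Dict.empty
  let cats :=
    items.foldl (fun (acc : List String × List String × List String × List String × List String) pr =>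
      let entry := pr.1 ++ "==" ++ pvMostCommon (pr.2.map (·.2))
      let lp := PySem.Str.lower pr.1
      if lp ∈ ["fastapi", "uvicorn", "starlette", "flask", "django"] then
        (acc.1 ++ [entry], acc.2.1, acc.2.2.1, acc.2.2.2.1, acc.2.2.2.2)
      else if lp ∈ ["sqlalchemy", "asyncpg", "psycopg2", "redis", "aioredis"] then
        (acc.1, acc.2.1 ++ [entry], acc.2.2.1, acc.2.2.2.1, acc.2.2.2.2)
      else if lp ∈ ["pytest", "pytest-asyncio", "pytest-cov", "coverage"] then
        (acc.1, acc.2.1, acc.2.2.1 ++ [entry], acc.2.2.2.1, acc.2.2.2.2)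
      else if lp ∈ ["pydantic", "click", "typer", "python-dotenv"] then
        (acc.1, acc.2.1, acc.2.2.1, acc.2.2.2.1 ++ [entry], acc.2.2.2.2)
      else
        (acc.1, acc.2.1, acc.2.2.1, acc.2.2.2.1, acc.2.2.2.2 ++ [entry]))
      ([], [], [], [], [])
  let consolidated := ["# CONSOLIDATED REQUIREMENTS", "# Auto-generated from dependency analysis", ""]
  let consolidated := if cats.1 ≠ [] then consolidated ++ ["# Web Frameworks"] ++ PySem.List.sorted cats.1 (fun x => x) false ++ [""] else consolidated
  let consolidated := if cats.2.1 ≠ [] then consolidated ++ ["# Databases & Caching"] ++ PySem.List.sorted cats.2.1 (fun x => x) false ++ [""] else consolidated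
  let consolidated := if cats.2.2.2.1 ≠ [] then consolidated ++ ["# Core Utilities"] ++ PySem.List.sorted cats.2.2.2.1 (fun x => x) false ++ [""] else consolidated
  let consolidated := if cats.2.2.1 ≠ [] then consolidated ++ ["# Testing"] ++ PySem.List.sorted cats.2.2.1 (fun x => x) false ++ [""] else consolidated
  let consolidated := if cats.2.2.2.2 ≠ [] then consolidated ++ ["# Other Dependencies"] ++ PySem.List.sorted cats.2.2.2.2 (fun x => x) false else consolidated
  PySem.Str.join "\n" consolidated

-- ===== PORT B =====
-- frozensets of Source B: membership-only, ported as their element lists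
def pvWeb : List String := ["fastapi", "uvicorn", "starlette", "flask", "django"]
def pvDb : List String := ["sqlalchemy", "asyncpg", "psycopg2", "redis", "aioredis"]
def pvUtil : List String := ["pydantic", "click", "typer", "python-dotenv"]
def pvTest : List String := ["pytest", "pytest-asyncio", "pytest-cov", "coverage"]

def pvSections : List (String × Option (List String) × Bool) :=
  [("# Web Frameworks", some pvWeb, true), ("# Databases & Caching", some pvDb, true),
   ("# Core Utilities", some pvUtil, true), ("# Testing", some pvTest, true),
   ("# Other Dependencies", none, false)]

-- _KNOWN = union of the four member sets (used only for membership tests)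
def pvKnown : List String := pvWeb ++ pvDb ++ pvUtil ++ pvTest

def generate_consolidated_requirements_alt (analysis : List (String × List (String × List (String × String)))) : String :=
  let items := (PySem.Dict.ofList ((PySem.Dict.ofList analysis).getD "duplicates" [])).items
  let parts := pvSections.foldl (fun acc s =>
      let entries := PySem.List.sorted
        ((items.filter (fun pr => match s.2.1 with
            | some members => decide (PySem.Str.lower pr.1 ∈ members)
            | none => !decide (PySem.Str.lower pr.1 ∈ pvKnown))).map
          (fun pr => pr.1 ++ "==" ++ pvMostCommon (pr.2.map (·.2)))) (fun x => x) false
      if entries ≠ [] then acc ++ [s.1] ++ entries ++ (if s.2.2 then [""] else []) else acc)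
    ["# CONSOLIDATED REQUIREMENTS", "# Auto-generated from dependency analysis", ""]
  PySem.Str.join "\n" parts

-- ===== PRECONDITION & SPEC =====
-- Pre_ excludes exactly the inputs where Python A raises: a missing 'duplicates' key (KeyError)
-- and an empty occurrence list for some package (IndexError on most_common(1)[0]).
def Pre_generate_consolidated_requirements (analysis : List (String × List (String × List (String × String)))) : Prop :=
  ((PySem.Dict.ofList analysis).get? "duplicates").isSome = true ∧
  ∀ pr ∈ (PySem.Dict.ofList ((PySem.Dict.ofList analysis).getD "duplicates" [])).items, pr.2 ≠ []
instance (analysis : List (String × List (String × List (String × String)))) : Decidable (Pre_generate_consolidated_requirements analysis) := by unfold Pre_generate_consolidated_requirements; infer_instance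

def pvWitness_generate_consolidated_requirements : (List (String × List (String × List (String × String)))) :=
  [("duplicates", [("fastapi", [("a.txt", "1.0")])])]

def Spec_generate_consolidated_requirements (analysis : List (String × List (String × List (String × String)))) (out : String) : Prop := out = generate_consolidated_requirements_alt analysis
instance (analysis : List (String × List (String × List (String × String)))) (out : String) : Decidable (Spec_generate_consolidated_requirements analysis out) := by unfold Spec_generate_consolidated_requirements; infer_instance

-- ===== CLAIM (what is proved, stated in full; the proofs are below) =====
def Claim_equal_generate_consolidated_requirements : Prop := ∀ (analysis : List (String × List (String × List (String × String)))), Dom_generate_consolidated_requirements analysis → Pre_generate_consolidated_requirements analysis → Spec_generate_consolidated_requirements analysis (generate_consolidated_requirements analysis)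

-- ===== LEMMAS AND PROOFS =====

-- the entry string and A's elif-chain conditions, as standalone predicates
def pvEntry (pr : String × List (String × String)) : String := pr.1 ++ "==" ++ pvMostCommon (pr.2.map (·.2))
def cW (pr : String × List (String × String)) : Bool := decide (PySem.Str.lower pr.1 ∈ pvWeb)
def cD (pr : String × List (String × String)) : Bool := !cW pr && decide (PySem.Str.lower pr.1 ∈ pvDb)
def cT (pr : String × List (String × String)) : Bool := !cW pr && !decide (PySem.Str.lower pr.1 ∈ pvDb) && decide (PySem.Str.lower pr.1 ∈ pvTest)
def cU (pr : String × List (String × String)) : Bool := !cW pr && !decide (PySem.Str.lower pr.1 ∈ pvDb) && !decide (PySem.Str.lower pr.1 ∈ pvTest) && decide (PySem.Str.lower pr.1 ∈ pvUtil)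
def cO (pr : String × List (String × String)) : Bool := !cW pr && !decide (PySem.Str.lower pr.1 ∈ pvDb) && !decide (PySem.Str.lower pr.1 ∈ pvTest) && !decide (PySem.Str.lower pr.1 ∈ pvUtil)

-- A's dispatch fold computes exactly the five filtered entry lists
theorem fold_filters (items : List (String × List (String × String))) :
    ∀ (w d t u o : List String),
      items.foldl (fun (acc : List String × List String × List String × List String × List String) pr =>
          let entry := pr.1 ++ "==" ++ pvMostCommon (pr.2.map (·.2))
          let lp := PySem.Str.lower pr.1
          if lp ∈ ["fastapi", "uvicorn", "starlette", "flask", "django"] then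
            (acc.1 ++ [entry], acc.2.1, acc.2.2.1, acc.2.2.2.1, acc.2.2.2.2)
          else if lp ∈ ["sqlalchemy", "asyncpg", "psycopg2", "redis", "aioredis"] then
            (acc.1, acc.2.1 ++ [entry], acc.2.2.1, acc.2.2.2.1, acc.2.2.2.2)
          else if lp ∈ ["pytest", "pytest-asyncio", "pytest-cov", "coverage"] then
            (acc.1, acc.2.1, acc.2.2.1 ++ [entry], acc.2.2.2.1, acc.2.2.2.2)
          else if lp ∈ ["pydantic", "click", "typer", "python-dotenv"] then
            (acc.1, acc.2.1, acc.2.2.1, acc.2.2.2.1 ++ [entry], acc.2.2.2.2)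
          else
            (acc.1, acc.2.1, acc.2.2.1, acc.2.2.2.1, acc.2.2.2.2 ++ [entry]))
        (w, d, t, u, o) =
      (w ++ ((items.filter cW).map pvEntry), d ++ ((items.filter cD).map pvEntry),
       t ++ ((items.filter cT).map pvEntry), u ++ ((items.filter cU).map pvEntry),
       o ++ ((items.filter cO).map pvEntry)) := by
  induction items with
  | nil => intro w d t u o; simp
  | cons pr rest ih =>
    intro w d t u o
    simp only [List.foldl_cons, List.filter_cons]
    by_cases h1 : PySem.Str.lower pr.1 ∈ pvWeb
    all_goals by_cases h2 : PySem.Str.lower pr.1 ∈ pvDb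
    all_goals by_cases h3 : PySem.Str.lower pr.1 ∈ pvTest
    all_goals by_cases h4 : PySem.Str.lower pr.1 ∈ pvUtil
    all_goals simp only [pvWeb, pvDb, pvTest, pvUtil, List.mem_cons, List.not_mem_nil,
      or_false, not_or] at h1 h2 h3 h4
    all_goals rw [ih]
    all_goals simp [cW, cD, cT, cU, cO, pvWeb, pvDb, pvTest, pvUtil, pvEntry,
      List.append_assoc, h1, h2, h3, h4]

-- the chain conditions coincide with B's flat membership tests (the member sets are disjoint)
theorem cD_eq (pr : String × List (String × String)) : cD pr = decide (PySem.Str.lower pr.1 ∈ pvDb) := by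
  by_cases h : PySem.Str.lower pr.1 ∈ pvDb
  · have hw : ¬ PySem.Str.lower pr.1 ∈ pvWeb := by
      simp only [pvDb, List.mem_cons, List.not_mem_nil, or_false] at h
      rcases h with h | h | h | h | h <;> rw [h] <;> decide
    simp [cD, cW, h, hw]
  · simp [cD, h]

theorem cT_eq (pr : String × List (String × String)) : cT pr = decide (PySem.Str.lower pr.1 ∈ pvTest) := by
  by_cases h : PySem.Str.lower pr.1 ∈ pvTest
  · have hw : ¬ PySem.Str.lower pr.1 ∈ pvWeb := by
      simp only [pvTest, List.mem_cons, List.not_mem_nil, or_false] at h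
      rcases h with h | h | h | h <;> rw [h] <;> decide
    have hd : ¬ PySem.Str.lower pr.1 ∈ pvDb := by
      simp only [pvTest, List.mem_cons, List.not_mem_nil, or_false] at h
      rcases h with h | h | h | h <;> rw [h] <;> decide
    simp [cT, cW, h, hw, hd]
  · simp [cT, h]

theorem cU_eq (pr : String × List (String × String)) : cU pr = decide (PySem.Str.lower pr.1 ∈ pvUtil) := by
  by_cases h : PySem.Str.lower pr.1 ∈ pvUtil
  · have hw : ¬ PySem.Str.lower pr.1 ∈ pvWeb := by
      simp only [pvUtil, List.mem_cons, List.not_mem_nil, or_false] at h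
      rcases h with h | h | h | h <;> rw [h] <;> decide
    have hd : ¬ PySem.Str.lower pr.1 ∈ pvDb := by
      simp only [pvUtil, List.mem_cons, List.not_mem_nil, or_false] at h
      rcases h with h | h | h | h <;> rw [h] <;> decide
    have ht : ¬ PySem.Str.lower pr.1 ∈ pvTest := by
      simp only [pvUtil, List.mem_cons, List.not_mem_nil, or_false] at h
      rcases h with h | h | h | h <;> rw [h] <;> decide
    simp [cU, cW, h, hw, hd, ht]
  · simp [cU, h]

theorem cO_eq (pr : String × List (String × String)) : cO pr = !decide (PySem.Str.lower pr.1 ∈ pvKnown) := by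
  by_cases h1 : PySem.Str.lower pr.1 ∈ pvWeb <;>
  by_cases h2 : PySem.Str.lower pr.1 ∈ pvDb <;>
  by_cases h3 : PySem.Str.lower pr.1 ∈ pvTest <;>
  by_cases h4 : PySem.Str.lower pr.1 ∈ pvUtil <;>
  simp [cO, cW, pvKnown, List.mem_append, h1, h2, h3, h4]

theorem cW_def : cW = fun pr : String × List (String × String) => decide (PySem.Str.lower pr.1 ∈ pvWeb) := rfl
theorem pvEntry_def : pvEntry = fun pr : String × List (String × String) => pr.1 ++ "==" ++ pvMostCommon (pr.2.map (·.2)) := rfl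

-- ===== VERDICT (by name: the statement is the Claim_ definition above) =====
theorem generate_consolidated_requirements_spec : Claim_equal_generate_consolidated_requirements := by
  intro analysis _dom _hpre
  unfold Spec_generate_consolidated_requirements
  unfold generate_consolidated_requirements generate_consolidated_requirements_alt
  dsimp only
  rw [fold_filters]
  simp only [pvSections, List.foldl_cons, List.foldl_nil, List.nil_append,
             List.filter_congr (fun pr _ => cD_eq pr), List.filter_congr (fun pr _ => cT_eq pr),
             List.filter_congr (fun pr _ => cU_eq pr), List.filter_congr (fun pr _ => cO_eq pr)]
  rw [cW_def, pvEntry_def]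
  simp only [ne_eq, PySem.List.sorted_eq_nil_iff, List.map_eq_nil_iff, List.append_assoc,
             Bool.false_eq_true, if_true, if_false, List.append_nil]
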